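-- pv_equiv track=rewrite | github.com/0xkayne/Distributed-Inference-for-DNN-in-SGX | experiments/models/check_layer_groups.py | get_layer_group
-- ===== SOURCE A (Python) =====
-- GROUP_CONFIGS = {
--     'Stem-Part1': {
--         'store_chunk_elem': 4276896,
--         'layer_names': ['input', 'stem_conv1', 'stem_relu1', 'stem_conv2', 'stem_relu2'],
--     },
--     'Stem-Part2': {
--         'store_chunk_elem': 1382976,
--         'layer_names': ['stem_conv3', 'stem_relu3', 'stem_pool1'],
--     },
--     'Stem-Part3': {
--         'store_chunk_elem': 70080,
--         'layer_names': ['stem_conv4', 'stem_relu4', 'stem_conv5', 'stem_relu5'],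
--     },
--     'Stem-Part4': {
--         'store_chunk_elem': 322624,
--         'layer_names': ['stem_pool2'],
--     },
--     'Inception-A1': {'store_chunk_elem': 235200, 'layer_prefixes': ['inception_a1_']},
--     'Inception-A2': {'store_chunk_elem': 235200, 'layer_prefixes': ['inception_a2_']},
--     'Inception-A3': {'store_chunk_elem': 235200, 'layer_prefixes': ['inception_a3_']},
--     'Reduction-A': {'store_chunk_elem': 470400, 'layer_prefixes': ['reduction_a']},
--     'Inception-B1': {'store_chunk_elem': 55488, 'layer_prefixes': ['inception_b1_']},
--     'Inception-B2': {'store_chunk_elem': 55488, 'layer_prefixes': ['inception_b2_']},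
--     'Inception-B3': {'store_chunk_elem': 55488, 'layer_prefixes': ['inception_b3_']},
--     'Inception-B4': {'store_chunk_elem': 55488, 'layer_prefixes': ['inception_b4_']},
--     'Reduction-B': {'store_chunk_elem': 277440, 'layer_prefixes': ['reduction_b']},
--     'Inception-C1': {'store_chunk_elem': 1920, 'layer_prefixes': ['inception_c1_']},
--     'Inception-C2': {'store_chunk_elem': 1920, 'layer_prefixes': ['inception_c2_']},
--     'Classifier': {'store_chunk_elem': 64000, 'layer_names': ['avgpool', 'flatten', 'fc', 'output']},
-- }
--
-- def get_layer_group(layer_name):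
--     """Determine which group a layer belongs to."""
--     # First, check for exact match in layer_names
--     for group_name, config in GROUP_CONFIGS.items():
--         if 'layer_names' in config:
--             if layer_name in config['layer_names']:
--                 return group_name
--
--     # Then, check for prefix match (more specific prefixes first)
--     sorted_groups = sorted(
--         GROUP_CONFIGS.items(),
--         key=lambda x: max(len(p) for p in x[1].get('layer_prefixes', [''])),
--         reverse=True
--     )
--
--     for group_name, config in sorted_groups:
--         for prefix in config.get('layer_prefixes', []):
--             if layer_name.startswith(prefix):
--                 return group_name
--
--     return None
-- ===== SOURCE B (Python) =====
-- GROUP_CONFIGS = {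
--     'Stem-Part1': {
--         'store_chunk_elem': 4276896,
--         'layer_names': ['input', 'stem_conv1', 'stem_relu1', 'stem_conv2', 'stem_relu2'],
--     },
--     'Stem-Part2': {
--         'store_chunk_elem': 1382976,
--         'layer_names': ['stem_conv3', 'stem_relu3', 'stem_pool1'],
--     },
--     'Stem-Part3': {
--         'store_chunk_elem': 70080,
--         'layer_names': ['stem_conv4', 'stem_relu4', 'stem_conv5', 'stem_relu5'],
--     },
--     'Stem-Part4': {
--         'store_chunk_elem': 322624,
--         'layer_names': ['stem_pool2'],
--     },
--     'Inception-A1': {'store_chunk_elem': 235200, 'layer_prefixes': ['inception_a1_']},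
--     'Inception-A2': {'store_chunk_elem': 235200, 'layer_prefixes': ['inception_a2_']},
--     'Inception-A3': {'store_chunk_elem': 235200, 'layer_prefixes': ['inception_a3_']},
--     'Reduction-A': {'store_chunk_elem': 470400, 'layer_prefixes': ['reduction_a']},
--     'Inception-B1': {'store_chunk_elem': 55488, 'layer_prefixes': ['inception_b1_']},
--     'Inception-B2': {'store_chunk_elem': 55488, 'layer_prefixes': ['inception_b2_']},
--     'Inception-B3': {'store_chunk_elem': 55488, 'layer_prefixes': ['inception_b3_']},
--     'Inception-B4': {'store_chunk_elem': 55488, 'layer_prefixes': ['inception_b4_']},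
--     'Reduction-B': {'store_chunk_elem': 277440, 'layer_prefixes': ['reduction_b']},
--     'Inception-C1': {'store_chunk_elem': 1920, 'layer_prefixes': ['inception_c1_']},
--     'Inception-C2': {'store_chunk_elem': 1920, 'layer_prefixes': ['inception_c2_']},
--     'Classifier': {'store_chunk_elem': 64000, 'layer_names': ['avgpool', 'flatten', 'fc', 'output']},
-- }
--
-- # Precomputed once at import: exact name -> group, and a flat (prefix, group) list.
-- _NAME_TO_GROUP = {name: group
--                   for group, config in GROUP_CONFIGS.items()
--                   for name in config.get('layer_names', [])}
-- _PREFIX_RULES = [(prefix, group)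
--                  for group, config in GROUP_CONFIGS.items()
--                  for prefix in config.get('layer_prefixes', [])]
--
--
-- def get_layer_group(layer_name):
--     """Determine which group a layer belongs to."""
--     group = _NAME_TO_GROUP.get(layer_name)
--     if group is not None:
--         return group
--     for prefix, group in _PREFIX_RULES:
--         if layer_name.startswith(prefix):
--             return group
--     return None
-- ===== Notes on version B (the rewrite author's own statement) =====
-- stated objective: simpler
-- what changed: Replaces A's two scans plus a by-prefix-length sort with a precomputed exact-name->group dict lookup followed by one unsorted pass over a flat (prefix, group) list; dropping the sort is exact because no prefix is a prefix of another, so at most one prefix can match any name.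
import Mathlib
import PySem

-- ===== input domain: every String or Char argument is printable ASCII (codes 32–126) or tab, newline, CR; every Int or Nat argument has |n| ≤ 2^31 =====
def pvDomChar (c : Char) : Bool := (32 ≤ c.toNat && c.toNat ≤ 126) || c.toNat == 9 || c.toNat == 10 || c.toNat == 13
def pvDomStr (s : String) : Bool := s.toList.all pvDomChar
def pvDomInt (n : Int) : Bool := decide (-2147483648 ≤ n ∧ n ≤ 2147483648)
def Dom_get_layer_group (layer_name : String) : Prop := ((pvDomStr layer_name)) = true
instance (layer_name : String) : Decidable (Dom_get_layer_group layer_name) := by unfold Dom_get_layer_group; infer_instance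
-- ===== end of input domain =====

-- B replaces A's two scans plus the by-prefix-length sort with a precomputed exact-name->group
-- dict lookup followed by one unsorted pass over a flat (prefix, group) list (objective: simpler).

-- ===== PORT A =====

-- Each GROUP_CONFIGS entry is a dict with an int and optional string-list fields; ported by hand
-- as a structure ('layer_names' in config ↦ .layer_names.isSome, .get(k, d) ↦ .getD d): exact here.
structure GroupConfig where
  store_chunk_elem : Int
  layer_names : Option (List String)
  layer_prefixes : Option (List String)
deriving Repr, DecidableEq

def GROUP_CONFIGS : List (String × GroupConfig) := [
  ("Stem-Part1", ⟨4276896, some ["input", "stem_conv1", "stem_relu1", "stem_conv2", "stem_relu2"], none⟩),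
  ("Stem-Part2", ⟨1382976, some ["stem_conv3", "stem_relu3", "stem_pool1"], none⟩),
  ("Stem-Part3", ⟨70080, some ["stem_conv4", "stem_relu4", "stem_conv5", "stem_relu5"], none⟩),
  ("Stem-Part4", ⟨322624, some ["stem_pool2"], none⟩),
  ("Inception-A1", ⟨235200, none, some ["inception_a1_"]⟩),
  ("Inception-A2", ⟨235200, none, some ["inception_a2_"]⟩),
  ("Inception-A3", ⟨235200, none, some ["inception_a3_"]⟩),
  ("Reduction-A", ⟨470400, none, some ["reduction_a"]⟩),
  ("Inception-B1", ⟨55488, none, some ["inception_b1_"]⟩),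
  ("Inception-B2", ⟨55488, none, some ["inception_b2_"]⟩),
  ("Inception-B3", ⟨55488, none, some ["inception_b3_"]⟩),
  ("Inception-B4", ⟨55488, none, some ["inception_b4_"]⟩),
  ("Reduction-B", ⟨277440, none, some ["reduction_b"]⟩),
  ("Inception-C1", ⟨1920, none, some ["inception_c1_"]⟩),
  ("Inception-C2", ⟨1920, none, some ["inception_c2_"]⟩),
  ("Classifier", ⟨64000, some ["avgpool", "flatten", "fc", "output"], none⟩)]

-- first for-loop: exact match in layer_names
def aNamePass (layer_name : String) : List (String × GroupConfig) → Option String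
  | [] => none
  | (group_name, config) :: rest =>
      match config.layer_names with
      | some names => if names.contains layer_name then some group_name
                      else aNamePass layer_name rest
      | none => aNamePass layer_name rest

-- key=lambda x: max(len(p) for p in x[1].get('layer_prefixes', ['']))
def aSortKey (config : GroupConfig) : Int :=
  (PySem.List.max? ((config.layer_prefixes.getD [""]).map (fun p => (PySem.Str.len p : Int)))
    (fun x => x)).getD 0

-- inner for-loop: for prefix in config.get('layer_prefixes', [])
def aInner (layer_name group_name : String) : List String → Option String
  | [] => none
  | prefixx :: rest =>
      if PySem.Str.startswith layer_name prefixx then some group_name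
      else aInner layer_name group_name rest

-- second for-loop, over sorted_groups
def aPrefixPass (layer_name : String) : List (String × GroupConfig) → Option String
  | [] => none
  | (group_name, config) :: rest =>
      match aInner layer_name group_name (config.layer_prefixes.getD []) with
      | some g => some g
      | none => aPrefixPass layer_name rest

def get_layer_group (layer_name : String) : Option String :=
  match aNamePass layer_name GROUP_CONFIGS with
  | some g => some g
  | none =>
      aPrefixPass layer_name (PySem.List.sorted GROUP_CONFIGS (fun x => aSortKey x.2) true)

-- ===== PORT B =====

-- _NAME_TO_GROUP = {name: group for group, config in GROUP_CONFIGS.items() for name in config.get('layer_names', [])}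
def bNameToGroup : PySem.Dict String String :=
  GROUP_CONFIGS.foldl
    (fun d p => (p.2.layer_names.getD []).foldl (fun d name => d.insert name p.1) d)
    PySem.Dict.empty

-- _PREFIX_RULES = [(prefix, group) for group, config in GROUP_CONFIGS.items() for prefix in config.get('layer_prefixes', [])]
def bPrefixRules : List (String × String) :=
  GROUP_CONFIGS.foldl
    (fun acc p => acc ++ (p.2.layer_prefixes.getD []).map (fun prefixx => (prefixx, p.1)))
    []

def bPrefixPass (layer_name : String) : List (String × String) → Option String
  | [] => none
  | (prefixx, group) :: rest =>
      if PySem.Str.startswith layer_name prefixx then some group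
      else bPrefixPass layer_name rest

def get_layer_group_alt (layer_name : String) : Option String :=
  match bNameToGroup.get? layer_name with
  | some group => some group
  | none => bPrefixPass layer_name bPrefixRules

-- ===== PRECONDITION & SPEC =====
def Spec_get_layer_group (layer_name : String) (out : Option String) : Prop := out = get_layer_group_alt layer_name
instance (layer_name : String) (out : Option String) : Decidable (Spec_get_layer_group layer_name out) := by unfold Spec_get_layer_group; infer_instance

-- ===== CLAIM (what is proved, stated in full; the proofs are below) =====
def Claim_equal_get_layer_group : Prop := ∀ (layer_name : String), Dom_get_layer_group layer_name → Spec_get_layer_group layer_name (get_layer_group layer_name)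

-- ===== LEMMAS AND PROOFS =====

theorem startswith_incompat (l p q : List Char) (h : PySem.Chars.startswith l p = true)
    (hpq : ¬ p <+: q) (hqp : ¬ q <+: p) : PySem.Chars.startswith l q = false := by
  by_contra hq
  rw [Bool.not_eq_false, PySem.Chars.startswith_iff] at hq
  rw [PySem.Chars.startswith_iff] at h
  rcases List.prefix_or_prefix_of_prefix h hq with h' | h'
  · exact hpq h'
  · exact hqp h'

def pvNames16 : List String := ["input", "stem_conv1", "stem_relu1", "stem_conv2", "stem_relu2", "stem_conv3", "stem_relu3", "stem_pool1", "stem_conv4", "stem_relu4", "stem_conv5", "stem_relu5", "stem_pool2", "avgpool", "flatten", "fc", "output"]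

-- the closed sorted_groups list of A's second pass, named so the scan below is over a literal
def pvSortedGroups : List (String × GroupConfig) := [
  ("Inception-A1", ⟨235200, none, some ["inception_a1_"]⟩),
  ("Inception-A2", ⟨235200, none, some ["inception_a2_"]⟩),
  ("Inception-A3", ⟨235200, none, some ["inception_a3_"]⟩),
  ("Inception-B1", ⟨55488, none, some ["inception_b1_"]⟩),
  ("Inception-B2", ⟨55488, none, some ["inception_b2_"]⟩),
  ("Inception-B3", ⟨55488, none, some ["inception_b3_"]⟩),
  ("Inception-B4", ⟨55488, none, some ["inception_b4_"]⟩),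
  ("Inception-C1", ⟨1920, none, some ["inception_c1_"]⟩),
  ("Inception-C2", ⟨1920, none, some ["inception_c2_"]⟩),
  ("Reduction-A", ⟨470400, none, some ["reduction_a"]⟩),
  ("Reduction-B", ⟨277440, none, some ["reduction_b"]⟩),
  ("Stem-Part1", ⟨4276896, some ["input", "stem_conv1", "stem_relu1", "stem_conv2", "stem_relu2"], none⟩),
  ("Stem-Part2", ⟨1382976, some ["stem_conv3", "stem_relu3", "stem_pool1"], none⟩),
  ("Stem-Part3", ⟨70080, some ["stem_conv4", "stem_relu4", "stem_conv5", "stem_relu5"], none⟩),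
  ("Stem-Part4", ⟨322624, some ["stem_pool2"], none⟩),
  ("Classifier", ⟨64000, some ["avgpool", "flatten", "fc", "output"], none⟩)]

theorem sorted_groups_eq :
    PySem.List.sorted GROUP_CONFIGS (fun x => aSortKey x.2) true = pvSortedGroups := by decide

set_option maxHeartbeats 2000000 in
theorem main_lemma : ∀ (s : String), get_layer_group s = get_layer_group_alt s := by
  intro s
  by_cases hmem : s ∈ pvNames16
  · simp only [pvNames16, List.mem_cons, List.not_mem_nil, or_false] at hmem
    rcases hmem with h | h | h | h | h | h | h | h | h | h | h | h | h | h | h | h | h <;>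
      subst h <;> decide
  · simp only [pvNames16, List.mem_cons, List.not_mem_nil, or_false, not_or] at hmem
    obtain ⟨h1, h2, h3, h4, h5, h6, h7, h8, h9, h10, h11, h12, h13, h14, h15, h16, h17⟩ := hmem
    have e1 : ("input" == s) = false := beq_eq_false_iff_ne.mpr (Ne.symm h1)
    have f1 : (s == "input") = false := beq_eq_false_iff_ne.mpr h1
    have e2 : ("stem_conv1" == s) = false := beq_eq_false_iff_ne.mpr (Ne.symm h2)
    have f2 : (s == "stem_conv1") = false := beq_eq_false_iff_ne.mpr h2
    have e3 : ("stem_relu1" == s) = false := beq_eq_false_iff_ne.mpr (Ne.symm h3)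
    have f3 : (s == "stem_relu1") = false := beq_eq_false_iff_ne.mpr h3
    have e4 : ("stem_conv2" == s) = false := beq_eq_false_iff_ne.mpr (Ne.symm h4)
    have f4 : (s == "stem_conv2") = false := beq_eq_false_iff_ne.mpr h4
    have e5 : ("stem_relu2" == s) = false := beq_eq_false_iff_ne.mpr (Ne.symm h5)
    have f5 : (s == "stem_relu2") = false := beq_eq_false_iff_ne.mpr h5
    have e6 : ("stem_conv3" == s) = false := beq_eq_false_iff_ne.mpr (Ne.symm h6)
    have f6 : (s == "stem_conv3") = false := beq_eq_false_iff_ne.mpr h6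
    have e7 : ("stem_relu3" == s) = false := beq_eq_false_iff_ne.mpr (Ne.symm h7)
    have f7 : (s == "stem_relu3") = false := beq_eq_false_iff_ne.mpr h7
    have e8 : ("stem_pool1" == s) = false := beq_eq_false_iff_ne.mpr (Ne.symm h8)
    have f8 : (s == "stem_pool1") = false := beq_eq_false_iff_ne.mpr h8
    have e9 : ("stem_conv4" == s) = false := beq_eq_false_iff_ne.mpr (Ne.symm h9)
    have f9 : (s == "stem_conv4") = false := beq_eq_false_iff_ne.mpr h9
    have e10 : ("stem_relu4" == s) = false := beq_eq_false_iff_ne.mpr (Ne.symm h10)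
    have f10 : (s == "stem_relu4") = false := beq_eq_false_iff_ne.mpr h10
    have e11 : ("stem_conv5" == s) = false := beq_eq_false_iff_ne.mpr (Ne.symm h11)
    have f11 : (s == "stem_conv5") = false := beq_eq_false_iff_ne.mpr h11
    have e12 : ("stem_relu5" == s) = false := beq_eq_false_iff_ne.mpr (Ne.symm h12)
    have f12 : (s == "stem_relu5") = false := beq_eq_false_iff_ne.mpr h12
    have e13 : ("stem_pool2" == s) = false := beq_eq_false_iff_ne.mpr (Ne.symm h13)
    have f13 : (s == "stem_pool2") = false := beq_eq_false_iff_ne.mpr h13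
    have e14 : ("avgpool" == s) = false := beq_eq_false_iff_ne.mpr (Ne.symm h14)
    have f14 : (s == "avgpool") = false := beq_eq_false_iff_ne.mpr h14
    have e15 : ("flatten" == s) = false := beq_eq_false_iff_ne.mpr (Ne.symm h15)
    have f15 : (s == "flatten") = false := beq_eq_false_iff_ne.mpr h15
    have e16 : ("fc" == s) = false := beq_eq_false_iff_ne.mpr (Ne.symm h16)
    have f16 : (s == "fc") = false := beq_eq_false_iff_ne.mpr h16
    have e17 : ("output" == s) = false := beq_eq_false_iff_ne.mpr (Ne.symm h17)
    have f17 : (s == "output") = false := beq_eq_false_iff_ne.mpr h17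
    by_cases ra : PySem.Chars.startswith s.toList ['r', 'e', 'd', 'u', 'c', 't', 'i', 'o', 'n', '_', 'a'] = true
    · -- "reduction_a" matches: no inception prefix (nor "reduction_b") can also match
      have ga1 : PySem.Chars.startswith s.toList ['i', 'n', 'c', 'e', 'p', 't', 'i', 'o', 'n', '_', 'a', '1', '_'] = false := startswith_incompat _ _ _ ra (by decide) (by decide)
      have ga2 : PySem.Chars.startswith s.toList ['i', 'n', 'c', 'e', 'p', 't', 'i', 'o', 'n', '_', 'a', '2', '_'] = false := startswith_incompat _ _ _ ra (by decide) (by decide)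
      have ga3 : PySem.Chars.startswith s.toList ['i', 'n', 'c', 'e', 'p', 't', 'i', 'o', 'n', '_', 'a', '3', '_'] = false := startswith_incompat _ _ _ ra (by decide) (by decide)
      have ga4 : PySem.Chars.startswith s.toList ['i', 'n', 'c', 'e', 'p', 't', 'i', 'o', 'n', '_', 'b', '1', '_'] = false := startswith_incompat _ _ _ ra (by decide) (by decide)
      have ga5 : PySem.Chars.startswith s.toList ['i', 'n', 'c', 'e', 'p', 't', 'i', 'o', 'n', '_', 'b', '2', '_'] = false := startswith_incompat _ _ _ ra (by decide) (by decide)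
      have ga6 : PySem.Chars.startswith s.toList ['i', 'n', 'c', 'e', 'p', 't', 'i', 'o', 'n', '_', 'b', '3', '_'] = false := startswith_incompat _ _ _ ra (by decide) (by decide)
      have ga7 : PySem.Chars.startswith s.toList ['i', 'n', 'c', 'e', 'p', 't', 'i', 'o', 'n', '_', 'b', '4', '_'] = false := startswith_incompat _ _ _ ra (by decide) (by decide)
      have ga8 : PySem.Chars.startswith s.toList ['i', 'n', 'c', 'e', 'p', 't', 'i', 'o', 'n', '_', 'c', '1', '_'] = false := startswith_incompat _ _ _ ra (by decide) (by decide)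
      have ga9 : PySem.Chars.startswith s.toList ['i', 'n', 'c', 'e', 'p', 't', 'i', 'o', 'n', '_', 'c', '2', '_'] = false := startswith_incompat _ _ _ ra (by decide) (by decide)
      simp only [get_layer_group, get_layer_group_alt]
      rw [sorted_groups_eq]
      simp [aNamePass, aPrefixPass, aInner, bPrefixPass, bNameToGroup, bPrefixRules, GROUP_CONFIGS, pvSortedGroups, PySem.Dict.insert, PySem.Dict.get?, PySem.Dict.empty, PySem.Dict.contains, List.contains, List.elem, e1, e2, e3, e4, e5, e6, e7, e8, e9, e10, e11, e12, e13, e14, e15, e16, e17, f1, f2, f3, f4, f5, f6, f7, f8, f9, f10, f11, f12, f13, f14, f15, f16, f17, ra, ga1, ga2, ga3, ga4, ga5, ga6, ga7, ga8, ga9]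
    · by_cases rb : PySem.Chars.startswith s.toList ['r', 'e', 'd', 'u', 'c', 't', 'i', 'o', 'n', '_', 'b'] = true
      · -- "reduction_b" matches: no inception prefix can also match
        have gb1 : PySem.Chars.startswith s.toList ['i', 'n', 'c', 'e', 'p', 't', 'i', 'o', 'n', '_', 'a', '1', '_'] = false := startswith_incompat _ _ _ rb (by decide) (by decide)
        have gb2 : PySem.Chars.startswith s.toList ['i', 'n', 'c', 'e', 'p', 't', 'i', 'o', 'n', '_', 'a', '2', '_'] = false := startswith_incompat _ _ _ rb (by decide) (by decide)
        have gb3 : PySem.Chars.startswith s.toList ['i', 'n', 'c', 'e', 'p', 't', 'i', 'o', 'n', '_', 'a', '3', '_'] = false := startswith_incompat _ _ _ rb (by decide) (by decide)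
        have gb4 : PySem.Chars.startswith s.toList ['i', 'n', 'c', 'e', 'p', 't', 'i', 'o', 'n', '_', 'b', '1', '_'] = false := startswith_incompat _ _ _ rb (by decide) (by decide)
        have gb5 : PySem.Chars.startswith s.toList ['i', 'n', 'c', 'e', 'p', 't', 'i', 'o', 'n', '_', 'b', '2', '_'] = false := startswith_incompat _ _ _ rb (by decide) (by decide)
        have gb6 : PySem.Chars.startswith s.toList ['i', 'n', 'c', 'e', 'p', 't', 'i', 'o', 'n', '_', 'b', '3', '_'] = false := startswith_incompat _ _ _ rb (by decide) (by decide)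
        have gb7 : PySem.Chars.startswith s.toList ['i', 'n', 'c', 'e', 'p', 't', 'i', 'o', 'n', '_', 'b', '4', '_'] = false := startswith_incompat _ _ _ rb (by decide) (by decide)
        have gb8 : PySem.Chars.startswith s.toList ['i', 'n', 'c', 'e', 'p', 't', 'i', 'o', 'n', '_', 'c', '1', '_'] = false := startswith_incompat _ _ _ rb (by decide) (by decide)
        have gb9 : PySem.Chars.startswith s.toList ['i', 'n', 'c', 'e', 'p', 't', 'i', 'o', 'n', '_', 'c', '2', '_'] = false := startswith_incompat _ _ _ rb (by decide) (by decide)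
        rw [Bool.not_eq_true] at ra
        simp only [get_layer_group, get_layer_group_alt]
        rw [sorted_groups_eq]
        simp [aNamePass, aPrefixPass, aInner, bPrefixPass, bNameToGroup, bPrefixRules, GROUP_CONFIGS, pvSortedGroups, PySem.Dict.insert, PySem.Dict.get?, PySem.Dict.empty, PySem.Dict.contains, List.contains, List.elem, e1, e2, e3, e4, e5, e6, e7, e8, e9, e10, e11, e12, e13, e14, e15, e16, e17, f1, f2, f3, f4, f5, f6, f7, f8, f9, f10, f11, f12, f13, f14, f15, f16, f17, ra, rb, gb1, gb2, gb3, gb4, gb5, gb6, gb7, gb8, gb9]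
      · -- neither reduction prefix matches: both scans test the inception prefixes in the same order
        rw [Bool.not_eq_true] at ra rb
        simp only [get_layer_group, get_layer_group_alt]
        rw [sorted_groups_eq]
        simp [aNamePass, aPrefixPass, aInner, bPrefixPass, bNameToGroup, bPrefixRules, GROUP_CONFIGS, pvSortedGroups, PySem.Dict.insert, PySem.Dict.get?, PySem.Dict.empty, PySem.Dict.contains, List.contains, List.elem, e1, e2, e3, e4, e5, e6, e7, e8, e9, e10, e11, e12, e13, e14, e15, e16, e17, f1, f2, f3, f4, f5, f6, f7, f8, f9, f10, f11, f12, f13, f14, f15, f16, f17, ra, rb]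
        split_ifs <;> rfl

-- ===== VERDICT (by name: the statement is the Claim_ definition above) =====
theorem get_layer_group_spec : Claim_equal_get_layer_group := by
  intro s _
  unfold Spec_get_layer_group
  exact main_lemma s
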